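-- pv_equiv track=rewrite | github.com/vincesanders/code_challenges | findGreaterMostRightIndex.py | find_greater_most_right_index
-- ===== SOURCE A (Python) =====
-- from heapq import heappush, heappop
--
-- def find_greater_most_right_index(nums):
--     heap = []
--
--     # Add values to heap in the form of a tuple (-(value), index)
--     for i, value in enumerate(nums):
--         # sort by negative value at current index
--         # we want the highest numbers to be at the top of our minheap
--         heappush(heap, (-value, i))
--
--     # build result array with intitial values of -1 (no greater value found)
--     result = [-1] * len(nums)
--     maxIndex = -1
--
--     # iterate till heap is empty
--     while heap:
--         current = heappop(heap) # current is a tuple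
--         currentIndex = current[1]
--
--         # if current index is more than max index or the value at the 2 indexes is equal
--         if currentIndex > maxIndex or nums[maxIndex] == nums[currentIndex]:
--             # max index becomes the higher of the 2
--             maxIndex = max(currentIndex, maxIndex)
--             continue
--
--         # else we add the max index to our result at the current index
--         result[currentIndex] = maxIndex
--         maxIndex = max(currentIndex, maxIndex) # set new maxIndex value
--
--     return result
-- ===== SOURCE B (Python) =====
-- def find_greater_most_right_index(nums):
--     n = len(nums)
--
--     def rightmost(i):
--         # scan right-to-left: first hit is the rightmost strictly greater value
--         for j in range(n - 1, i, -1):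
--             if nums[j] > nums[i]:
--                 return j
--         return -1
--
--     return [rightmost(i) for i in range(n)]
-- ===== Notes on version B (the rewrite author's own statement) =====
-- stated objective: simpler
-- what changed: Replaces A's heap of (-value, index) tuples drained in value order with a running max index by a direct per-index right-to-left scan that returns the first (hence rightmost) strictly greater element's index.
import Mathlib
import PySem

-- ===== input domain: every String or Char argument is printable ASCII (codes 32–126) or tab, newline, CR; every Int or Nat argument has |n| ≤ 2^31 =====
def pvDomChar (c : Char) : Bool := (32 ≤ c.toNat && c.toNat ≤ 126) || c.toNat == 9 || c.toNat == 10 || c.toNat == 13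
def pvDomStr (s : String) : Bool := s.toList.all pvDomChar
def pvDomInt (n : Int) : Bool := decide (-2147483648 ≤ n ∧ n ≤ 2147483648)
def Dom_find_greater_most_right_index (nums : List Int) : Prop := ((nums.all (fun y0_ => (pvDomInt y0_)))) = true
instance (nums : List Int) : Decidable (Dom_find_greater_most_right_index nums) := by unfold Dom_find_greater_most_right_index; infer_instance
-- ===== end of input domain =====

-- B replaces A's heap-of-(-value,index) sweep by a per-index right-to-left scan (simpler, no heap).

-- ===== PORT A =====
-- the body of A's while loop; state = (result, maxIndex)
def stepA (nums : List Int) (st : List Int × Int) (current : Int × Int) : List Int × Int :=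
  let currentIndex := current.2
  if currentIndex > st.2 ∨ PySem.List.pyGetD nums st.2 0 = PySem.List.pyGetD nums currentIndex 0 then
    (st.1, max currentIndex st.2)
  else
    (PySem.List.pySetD st.1 currentIndex st.2, max currentIndex st.2)

def find_greater_most_right_index (nums : List Int) : List Int :=
  -- heapq port: pushing every (-value, i) tuple and then popping until empty yields the
  -- tuples in increasing (lexicographic tuple) order — exactly the lex-sorted list.
  let heap := PySem.List.sorted2 ((PySem.List.enumerate nums).map (fun p => (-p.2, p.1)))
      (fun t => t.1) (fun t => t.2)
  let st := heap.foldl (stepA nums) (PySem.List.pyRepeat [(-1 : Int)] (PySem.List.len nums), -1)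
  st.1

-- ===== PORT B =====
def find_greater_most_right_index_alt (nums : List Int) : List Int :=
  let n : Int := PySem.List.len nums
  (PySem.List.pyRange 0 n 1).map (fun i =>
    match (PySem.List.pyRange (n - 1) i (-1)).find?
        (fun j => decide (PySem.List.pyGetD nums j 0 > PySem.List.pyGetD nums i 0)) with
    | some j => j
    | none => -1)

-- ===== PRECONDITION & SPEC =====
def Spec_find_greater_most_right_index (nums : List Int) (out : List Int) : Prop := out = find_greater_most_right_index_alt nums
instance (nums : List Int) (out : List Int) : Decidable (Spec_find_greater_most_right_index nums out) := by unfold Spec_find_greater_most_right_index; infer_instance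

-- ===== CLAIM (what is proved, stated in full; the proofs are below) =====
def Claim_equal_find_greater_most_right_index : Prop := ∀ (nums : List Int), Dom_find_greater_most_right_index nums → Spec_find_greater_most_right_index nums (find_greater_most_right_index nums)

-- ===== LEMMAS AND PROOFS =====

-- value at an Int index (total form used by both ports)
def vAt (nums : List Int) (i : Int) : Int := PySem.List.pyGetD nums i 0

-- the list A pushes onto the heap
def pairsOf (nums : List Int) : List (Int × Int) :=
  (PySem.List.enumerate nums).map (fun p => (-p.2, p.1))

-- B's per-index answer
def ans (nums : List Int) (i : Int) : Int :=
  match (PySem.List.pyRange (PySem.List.len nums - 1) i (-1)).find?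
      (fun j => decide (PySem.List.pyGetD nums j 0 > PySem.List.pyGetD nums i 0)) with
  | some j => j
  | none => -1

-- the boolean "strictly before" relation sorted2 uses, and its Prop form
def bltb (a b : Int × Int) : Bool :=
  decide (a.1 < b.1) || (!decide (b.1 < a.1) && decide (a.2 < b.2))

def bltP (a b : Int × Int) : Prop := a.1 < b.1 ∨ (a.1 = b.1 ∧ a.2 < b.2)

def maxIdx (P : List (Int × Int)) : Int := P.foldl (fun acc p => max acc p.2) (-1)

lemma bltb_asymm (a b : Int × Int) (h : bltb a b = true) : bltb b a = false := by
  simp [bltb] at *; omega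

lemma bltb_trans (a b c : Int × Int) (h1 : bltb a b = true) (h2 : bltb b c = true) :
    bltb a c = true := by
  simp [bltb] at *; omega

lemma pairwise_insertBy (x : Int × Int) (acc : List (Int × Int))
    (h : acc.Pairwise (fun a b => bltb b a = false)) :
    (PySem.List.insertBy bltb x acc).Pairwise (fun a b => bltb b a = false) := by
  induction acc with
  | nil => simp [PySem.List.insertBy]
  | cons y ys ih =>
    rw [List.pairwise_cons] at h
    by_cases hxy : bltb x y = true
    · rw [show PySem.List.insertBy bltb x (y :: ys) = x :: y :: ys by
        simp [PySem.List.insertBy, hxy]]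
      refine List.Pairwise.cons ?_ (List.Pairwise.cons h.1 h.2)
      intro z hz
      rcases List.mem_cons.mp hz with rfl | hz'
      · exact bltb_asymm _ _ hxy
      · rcases hb : bltb z x with _ | _
        · rfl
        · have h1 := bltb_trans _ _ _ hb hxy
          have h2 := h.1 z hz'
          simp_all
    · rw [show PySem.List.insertBy bltb x (y :: ys) = y :: PySem.List.insertBy bltb x ys by
        simp [PySem.List.insertBy, hxy]]
      refine List.Pairwise.cons ?_ (ih h.2)
      intro z hz
      rw [PySem.List.insertBy_mem_iff] at hz
      rcases hz with rfl | hz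
      · simpa using hxy
      · exact h.1 z hz

lemma pairwise_foldl_insertBy (xs acc : List (Int × Int))
    (h : acc.Pairwise (fun a b => bltb b a = false)) :
    (xs.foldl (fun acc x => PySem.List.insertBy bltb x acc) acc).Pairwise
      (fun a b => bltb b a = false) := by
  induction xs generalizing acc with
  | nil => exact h
  | cons y ys ih => exact ih _ (pairwise_insertBy y acc h)

lemma sorted2_eq_foldl (xs : List (Int × Int)) :
    PySem.List.sorted2 xs (fun t => t.1) (fun t => t.2) =
      xs.foldl (fun acc x => PySem.List.insertBy bltb x acc) [] := by
  rfl

lemma mem_pairsOf {nums : List Int} {p : Int × Int} :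
    p ∈ pairsOf nums ↔ ∃ k : Nat, k < nums.length ∧ p = (-(vAt nums (k : Int)), (k : Int)) := by
  simp only [pairsOf, List.mem_map, PySem.List.mem_enumerate_iff]
  constructor
  · rintro ⟨q, ⟨k, hk, rfl⟩, rfl⟩
    exact ⟨k, hk, by simp [vAt, List.getD_eq_getElem?_getD, hk]⟩
  · rintro ⟨k, hk, rfl⟩
    exact ⟨((k : Int), nums[k]), ⟨k, hk, by simp⟩, by simp [vAt, List.getD_eq_getElem?_getD, hk]⟩

lemma nodup_pairsOf (nums : List Int) : (pairsOf nums).Nodup := by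
  refine List.Nodup.map ?_ ?_
  · rintro ⟨a, b⟩ ⟨c, d⟩ h
    simp only [Prod.mk.injEq] at h
    exact Prod.ext_iff.mpr ⟨by omega, by omega⟩
  · exact (PySem.List.pairwise_lt_enumerate nums 0).imp (fun h => by
      intro he; rw [he] at h; exact lt_irrefl _ h)

lemma find?_desc_max {p : Int → Bool} {l : List Int} (hd : l.Pairwise (· > ·)) {j : Int}
    (h : l.find? p = some j) : ∀ x ∈ l, p x = true → x ≤ j := by
  induction l with
  | nil => simp at h
  | cons a t ih =>
    rw [List.pairwise_cons] at hd
    intro x hx hp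
    rcases hpa : p a with _ | _
    · rw [List.find?_cons_of_neg (by simp [hpa])] at h
      rcases List.mem_cons.mp hx with rfl | hx'
      · simp [hpa] at hp
      · exact ih hd.2 h x hx' hp
    · rw [List.find?_cons_of_pos hpa] at h
      obtain rfl := Option.some_injective _ h
      rcases List.mem_cons.mp hx with rfl | hx'
      · exact le_refl _
      · exact le_of_lt (hd.1 x hx')

lemma ans_spec (nums : List Int) (i : Int) :
    (ans nums i = -1 ∧ ∀ j : Int, i < j → j < nums.length → ¬ vAt nums j > vAt nums i)
    ∨ (i < ans nums i ∧ ans nums i < nums.length ∧ vAt nums (ans nums i) > vAt nums i ∧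
       ∀ j : Int, i < j → j < nums.length → vAt nums j > vAt nums i → j ≤ ans nums i) := by
  set l := PySem.List.pyRange (PySem.List.len nums - 1) i (-1) with hl
  have hmem : ∀ x : Int, x ∈ l ↔ i < x ∧ x ≤ PySem.List.len nums - 1 := by
    intro x; rw [hl, PySem.List.mem_pyRange_neg_one]
  have hdesc : l.Pairwise (· > ·) := by
    rw [hl, PySem.List.pyRange_neg_one_eq_reverse, List.pairwise_reverse]
    exact PySem.List.pairwise_lt_pyRange_one _ _
  rcases hf : l.find? (fun j => decide (PySem.List.pyGetD nums j 0 > PySem.List.pyGetD nums i 0))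
      with _ | j
  · left
    constructor
    · simp only [ans, ← hl, hf]
    · intro j h1 h2 h3
      have hj : j ∈ l := (hmem j).mpr ⟨h1, by simp; omega⟩
      have := List.find?_eq_none.mp hf j hj
      simp only [decide_eq_true_eq] at this
      exact this h3
  · right
    have hj : j ∈ l := List.mem_of_find?_eq_some hf
    have hp := List.find?_some hf
    simp only [decide_eq_true_eq] at hp
    have hrange := (hmem j).mp hj
    have hrange2 : i < j ∧ j ≤ (nums.length : Int) - 1 := by simpa using hrange
    have hansj : ans nums i = j := by simp only [ans, ← hl, hf]
    rw [hansj]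
    refine ⟨hrange2.1, by omega, hp, ?_⟩
    intro x h1 h2 h3
    exact find?_desc_max hdesc hf x ((hmem x).mpr ⟨h1, by simp; omega⟩) (by simpa using h3)

lemma ans_eq_neg_one {nums : List Int} {i : Int}
    (h : ∀ j : Int, i < j → j < nums.length → ¬ vAt nums j > vAt nums i) : ans nums i = -1 := by
  rcases ans_spec nums i with ⟨h1, _⟩ | ⟨h1, h2, h3, _⟩
  · exact h1
  · exact absurd h3 (h _ h1 h2)

lemma ans_eq {nums : List Int} {i m : Int} (hm : i < m) (hm2 : m < nums.length)
    (hv : vAt nums m > vAt nums i)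
    (hmax : ∀ j : Int, i < j → j < nums.length → vAt nums j > vAt nums i → j ≤ m) :
    ans nums i = m := by
  rcases ans_spec nums i with ⟨_, h2⟩ | ⟨h1, h2, h3, h4⟩
  · exact absurd hv (h2 _ hm hm2)
  · exact le_antisymm (hmax _ h1 h2 h3) (h4 _ hm hm2 hv)

lemma maxIdx_append_singleton (P : List (Int × Int)) (c : Int × Int) :
    maxIdx (P ++ [c]) = max (maxIdx P) c.2 := by
  simp [maxIdx]

lemma le_maxIdx {P : List (Int × Int)} {p : Int × Int} (hp : p ∈ P) : p.2 ≤ maxIdx P :=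
  (PySem.List.le_foldl_max_int P (fun p => p.2) (-1)).2 p hp

lemma maxIdx_mem (P : List (Int × Int)) : maxIdx P = -1 ∨ ∃ p ∈ P, p.2 = maxIdx P := by
  have h : maxIdx P = (P.map (fun p => p.2)).foldl max (-1) := by
    rw [List.foldl_map]
    rfl
  rw [h]
  rcases PySem.List.foldl_max_mem (P.map (fun p => p.2)) (-1) with h2 | h2
  · exact Or.inl h2
  · rcases List.mem_map.mp h2 with ⟨p, hp, he⟩
    exact Or.inr ⟨p, hp, he⟩

lemma loop_inv (nums : List Int) :
    ∀ (S P : List (Int × Int)) (res : List Int),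
      (P ++ S).Perm (pairsOf nums) →
      (P ++ S).Pairwise bltP →
      res.length = nums.length →
      (∀ k : Nat, k < nums.length →
        PySem.List.pyGetD res (k : Int) 0 =
          if (-(vAt nums (k : Int)), (k : Int)) ∈ P then ans nums (k : Int) else -1) →
      (S.foldl (stepA nums) (res, maxIdx P)).1.length = nums.length ∧
      ∀ k : Nat, k < nums.length →
        PySem.List.pyGetD (S.foldl (stepA nums) (res, maxIdx P)).1 (k : Int) 0 =
          ans nums (k : Int) := by
  intro S
  induction S with
  | nil =>
    intro P res hperm hpw hlen hres
    refine ⟨by simpa using hlen, ?_⟩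
    intro k hk
    simp only [List.foldl_nil]
    rw [hres k hk, if_pos]
    have h1 : (-(vAt nums (k : Int)), (k : Int)) ∈ pairsOf nums := mem_pairsOf.mpr ⟨k, hk, rfl⟩
    have h2 := hperm.symm.subset h1
    simpa using h2
  | cons c S' ih =>
    intro P res hperm hpw hlen hres
    have hc : c ∈ pairsOf nums := hperm.subset (by simp)
    obtain ⟨k₀, hk₀, hceq⟩ := mem_pairsOf.mp hc
    subst hceq
    set c : Int × Int := (-(vAt nums (k₀ : Int)), (k₀ : Int)) with hc_def
    have hnd : (P ++ c :: S').Nodup := hperm.nodup_iff.mpr (nodup_pairsOf nums)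
    have hcP : c ∉ P := by
      intro hmem
      have hd := (List.nodup_append.mp hnd).2.2
      exact hd c hmem c (by simp) rfl
    have hPc : ∀ p ∈ P, bltP p c := by
      intro p hp
      exact (List.pairwise_append.mp hpw).2.2 p hp c (by simp)
    have hcS : ∀ q ∈ S', bltP c q :=
      (List.pairwise_cons.mp (List.pairwise_append.mp hpw).2.1).1
    have hKey : ∀ p ∈ pairsOf nums, bltP p c → p ∈ P := by
      intro p hp hblt
      have hmem : p ∈ P ++ c :: S' := hperm.symm.subset hp
      rcases List.mem_append.mp hmem with h | h
      · exact h
      · exfalso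
        rcases List.mem_cons.mp h with rfl | h'
        · simp only [bltP] at hblt; omega
        · have := hcS p h'
          simp only [bltP] at hblt this
          omega
    have hk₀P : ∀ p ∈ P, p.2 ≠ (k₀ : Int) := by
      intro p hp he
      obtain ⟨k', hk', he'⟩ :=
        mem_pairsOf.mp (hperm.subset (List.mem_append.mpr (Or.inl hp)))
      have hkk : (k' : Int) = (k₀ : Int) := by rw [he'] at he; exact he
      have : p = c := by rw [he', hc_def, hkk]
      exact hcP (this ▸ hp)
    set m := maxIdx P with hm
    -- every index j whose value beats nums[k₀] has its pair in P, hence j ≤ m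
    have hInP : ∀ j : Int, 0 ≤ j → j < nums.length → vAt nums j > vAt nums (k₀ : Int) →
        j ≤ m := by
      intro j hj0 hjlen hjv
      have hpj : (-(vAt nums j), j) ∈ pairsOf nums :=
        mem_pairsOf.mpr ⟨j.toNat, by omega, by rw [Int.toNat_of_nonneg hj0]⟩
      have hblt : bltP (-(vAt nums j), j) c := Or.inl (by simp only [hc_def]; omega)
      exact le_maxIdx (hKey _ hpj hblt)
    rw [List.foldl_cons]
    by_cases hcase : (k₀ : Int) > m
    · -- branch taken: current index is beyond every processed index; no greater value right of k₀
      have hans : ans nums (k₀ : Int) = -1 := by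
        apply ans_eq_neg_one
        intro j h1 h2 h3
        have := hInP j (by omega) h2 h3
        omega
      have hstep : stepA nums (res, m) c = (res, max c.2 m) := by
        simp only [stepA]
        rw [if_pos (Or.inl hcase)]
      have hmax' : max c.2 m = maxIdx (P ++ [c]) := by
        rw [maxIdx_append_singleton, max_comm]
      rw [hstep, hmax']
      apply ih (P ++ [c]) res
      · simpa using hperm
      · simpa using hpw
      · exact hlen
      · intro k hk
        rw [hres k hk]
        by_cases hkk : k = k₀
        · subst hkk
          rw [if_neg (fun hmem => hk₀P _ hmem rfl), if_pos (by simp [hc_def])]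
          exact hans.symm
        · rw [if_congr (by
            show ((-(vAt nums (k : Int)), (k : Int)) ∈ P) ↔
              ((-(vAt nums (k : Int)), (k : Int)) ∈ P ++ [c])
            constructor
            · exact fun h' => List.mem_append.mpr (Or.inl h')
            · intro h'
              rcases List.mem_append.mp h' with h'' | h''
              · exact h''
              · exfalso
                rw [List.mem_singleton, hc_def] at h''
                have h2 := congrArg Prod.snd h''
                simp only [Nat.cast_inj] at h2
                exact hkk h2) rfl rfl]
    · -- branch not taken: maxIndex already points at a strictly greater value right of k₀
      have h0 : (k₀ : Int) ≤ m := by omega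
      have hm0 : (0 : Int) ≤ m := le_trans (by positivity) h0
      obtain ⟨p, hpP, hpm⟩ := (maxIdx_mem P).resolve_left (by omega)
      have hlt : (k₀ : Int) < m := lt_of_le_of_ne h0 (fun he => hk₀P p hpP (hpm.trans he.symm))
      obtain ⟨k', hk', he'⟩ :=
        mem_pairsOf.mp (hperm.subset (List.mem_append.mpr (Or.inl hpP)))
      have hkm : (k' : Int) = m := by rw [he'] at hpm; exact hpm
      have hmlen : m < (nums.length : Int) := by omega
      have hvm : vAt nums m > vAt nums (k₀ : Int) := by
        have hbp := hPc p hpP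
        rw [he', hkm] at hbp
        simp only [bltP, hc_def] at hbp
        omega
      have hcond : ¬ (c.2 > m ∨ PySem.List.pyGetD nums m 0 = PySem.List.pyGetD nums c.2 0) := by
        rintro (h1 | h2)
        · exact hcase h1
        · exact ne_of_gt hvm h2
      have hstep : stepA nums (res, m) c =
          (PySem.List.pySetD res c.2 m, max c.2 m) := by
        simp only [stepA]
        rw [if_neg hcond]
      have hans : ans nums (k₀ : Int) = m := by
        apply ans_eq hlt hmlen hvm
        intro j h1 h2 h3
        exact hInP j (by omega) h2 h3
      have hmax' : max c.2 m = maxIdx (P ++ [c]) := by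
        rw [maxIdx_append_singleton, max_comm]
      rw [hstep, hmax']
      apply ih (P ++ [c]) (PySem.List.pySetD res c.2 m)
      · simpa using hperm
      · simpa using hpw
      · rw [PySem.List.length_pySetD]; exact hlen
      · intro k hk
        have hc2 : c.2 = ((k₀ : Nat) : Int) := rfl
        have hset := PySem.List.pyGetD_pySetD_natCast res k₀ k m 0 (by omega)
        rw [hc2, hset]
        by_cases hkk : k = k₀
        · subst hkk
          rw [if_pos rfl, if_pos (by simp [hc_def])]
          exact hans.symm
        · rw [if_neg hkk, hres k hk]
          rw [if_congr (by
            show ((-(vAt nums (k : Int)), (k : Int)) ∈ P) ↔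
              ((-(vAt nums (k : Int)), (k : Int)) ∈ P ++ [c])
            constructor
            · exact fun h' => List.mem_append.mpr (Or.inl h')
            · intro h'
              rcases List.mem_append.mp h' with h'' | h''
              · exact h''
              · exfalso
                rw [List.mem_singleton, hc_def] at h''
                have h2 := congrArg Prod.snd h''
                simp only [Nat.cast_inj] at h2
                exact hkk h2) rfl rfl]

lemma sorted2_pairwise_bltP (nums : List Int) :
    (PySem.List.sorted2 (pairsOf nums) (fun t => t.1) (fun t => t.2)).Pairwise bltP := by
  have hle : (PySem.List.sorted2 (pairsOf nums) (fun t => t.1) (fun t => t.2)).Pairwise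
      (fun a b => bltb b a = false) := by
    rw [sorted2_eq_foldl]
    exact pairwise_foldl_insertBy _ [] (by simp)
  have hnd : (PySem.List.sorted2 (pairsOf nums) (fun t => t.1) (fun t => t.2)).Nodup :=
    (PySem.List.sorted2_perm _ _ _ _).nodup_iff.mpr (nodup_pairsOf nums)
  refine (hle.and hnd).imp ?_
  rintro a b ⟨h1, h2⟩
  simp only [bltb, Bool.or_eq_false_iff, Bool.and_eq_false_iff, decide_eq_false_iff_not,
    Bool.not_eq_false', decide_eq_true_eq] at h1
  rw [Ne, Prod.ext_iff] at h2
  simp only [bltP]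
  omega

-- ===== VERDICT (by name: the statement is the Claim_ definition above) =====
theorem find_greater_most_right_index_spec : Claim_equal_find_greater_most_right_index := by
  intro nums _
  show find_greater_most_right_index nums = find_greater_most_right_index_alt nums
  have hA : find_greater_most_right_index nums =
      ((PySem.List.sorted2 (pairsOf nums) (fun t => t.1) (fun t => t.2)).foldl (stepA nums)
        (PySem.List.pyRepeat [(-1 : Int)] (PySem.List.len nums), -1)).1 := rfl
  have hB : find_greater_most_right_index_alt nums =
      (PySem.List.pyRange 0 (PySem.List.len nums) 1).map (fun i => ans nums i) := rfl
  have hrep : PySem.List.pyRepeat [(-1 : Int)] (PySem.List.len nums) =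
      List.replicate nums.length (-1) := by
    rw [PySem.List.pyRepeat_singleton]
    simp
  obtain ⟨hlenA, hvalA⟩ := loop_inv nums
    (PySem.List.sorted2 (pairsOf nums) (fun t => t.1) (fun t => t.2)) []
    (List.replicate nums.length (-1))
    (by simpa using PySem.List.sorted2_perm (pairsOf nums) (fun t => t.1) (fun t => t.2) false)
    (by simpa using sorted2_pairwise_bltP nums)
    (by simp)
    (by
      intro k hk
      rw [if_neg (List.not_mem_nil)]
      simp [List.getD_eq_getElem?_getD, hk])
  have hmaxnil : maxIdx ([] : List (Int × Int)) = -1 := rfl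
  rw [hmaxnil] at hlenA hvalA
  rw [hA, hB, hrep]
  have hlenB : ((PySem.List.pyRange 0 (PySem.List.len nums) 1).map (fun i => ans nums i)).length
      = nums.length := by
    simp [PySem.List.length_pyRange_one]
  apply List.ext_getElem (by rw [hlenA, hlenB])
  intro k hk1 hk2
  have hk : k < nums.length := by rwa [hlenA] at hk1
  have hv := hvalA k hk
  have hgd : PySem.List.pyGetD
      ((PySem.List.sorted2 (pairsOf nums) (fun t => t.1) (fun t => t.2)).foldl (stepA nums)
        (List.replicate nums.length (-1), (-1 : Int))).1 (k : Int) 0 =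
      ((PySem.List.sorted2 (pairsOf nums) (fun t => t.1) (fun t => t.2)).foldl (stepA nums)
        (List.replicate nums.length (-1), (-1 : Int))).1[k] := by
    rw [PySem.List.pyGetD_natCast]
    exact List.getD_eq_getElem _ _ hk1
  rw [← hgd, hv]
  rw [List.getElem_map, PySem.List.getElem_pyRange_one]
  simp
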